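-- pv_equiv track=rewrite | github.com/Rafapeerez/AdventOfCode2023 | Day3/prueba.py | procesar_vector
-- ===== SOURCE A (Python) =====
-- def procesar_vector(vector):
--     resultado = []
--     numero_actual = ''
--
--     for elemento in vector:
--         if elemento.isdigit():
--             numero_actual += elemento
--         elif elemento == '+':
--             if numero_actual:
--                 resultado.append(int(numero_actual))
--                 numero_actual = ''
--
--     if numero_actual:
--         resultado.append(int(numero_actual))
--
--     return resultado
-- ===== SOURCE B (Python) =====
-- def procesar_vector(vector):
--     filtered = ''.join(e for e in vector if e.isdigit() or e == '+')
--     return [int(s) for s in filtered.split('+') if s]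
-- ===== Notes on version B (the rewrite author's own statement) =====
-- stated objective: simpler
-- what changed: Replaces A's stateful scan with an accumulator and manual flushes by a stateless filter-join / split-on-'+' / map-to-int pipeline.
import Mathlib
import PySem

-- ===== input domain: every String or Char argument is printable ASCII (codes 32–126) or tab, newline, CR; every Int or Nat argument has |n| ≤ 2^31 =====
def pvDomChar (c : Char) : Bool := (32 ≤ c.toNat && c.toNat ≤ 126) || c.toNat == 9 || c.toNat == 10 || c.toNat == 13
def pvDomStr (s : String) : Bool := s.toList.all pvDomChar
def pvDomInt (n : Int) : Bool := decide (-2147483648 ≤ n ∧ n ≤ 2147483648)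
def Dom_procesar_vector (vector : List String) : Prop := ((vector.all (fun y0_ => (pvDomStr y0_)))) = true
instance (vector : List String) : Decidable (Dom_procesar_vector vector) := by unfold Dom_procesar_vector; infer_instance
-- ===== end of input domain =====

-- B replaces A's stateful accumulate-and-flush scan by a stateless filter/split/map pipeline (objective: simpler).

-- ===== PORT A =====
-- int(numero_actual): numero_actual is always a nonempty digit string here, so int() never raises;
-- the getD 0 default is unreachable.
def pvIntOf (cs : List Char) : Int := (PySem.Int.ofChars? cs).getD 0

-- the for-loop of A: state = (resultado, numero_actual as chars)
def pvA_loop : List String → List Int → List Char → List Int × List Char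
  | [], res, cur => (res, cur)
  | e :: rest, res, cur =>
    if PySem.Str.strIsdigit e then pvA_loop rest res (cur ++ e.toList)
    else if e == "+" then
      if cur ≠ [] then pvA_loop rest (res ++ [pvIntOf cur]) [] else pvA_loop rest res cur
    else pvA_loop rest res cur

def procesar_vector (vector : List String) : List Int :=
  let st := pvA_loop vector [] []
  if st.2 ≠ [] then st.1 ++ [pvIntOf st.2] else st.1

-- ===== PORT B =====
-- filtered = ''.join(e for e in vector if e.isdigit() or e == '+')
-- return [int(s) for s in filtered.split('+') if s]
def procesar_vector_alt (vector : List String) : List Int :=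
  let filtered : List Char :=
    (vector.filter (fun e => PySem.Str.strIsdigit e || e == "+")).flatMap String.toList
  ((filtered.splitOnP (· == '+')).filter (fun s => !s.isEmpty)).map pvIntOf

-- ===== PRECONDITION & SPEC =====
def Spec_procesar_vector (vector : List String) (out : List Int) : Prop := out = procesar_vector_alt vector
instance (vector : List String) (out : List Int) : Decidable (Spec_procesar_vector vector out) := by unfold Spec_procesar_vector; infer_instance

-- ===== CLAIM (what is proved, stated in full; the proofs are below) =====
def Claim_equal_procesar_vector : Prop := ∀ (vector : List String), Dom_procesar_vector vector → Spec_procesar_vector vector (procesar_vector vector)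

-- ===== LEMMAS AND PROOFS =====

-- character-level version of A's scan, over the filtered character stream
def pvScanC : List Char → List Int → List Char → List Int
  | [], res, cur => if cur ≠ [] then res ++ [pvIntOf cur] else res
  | c :: cs, res, cur =>
    if c = '+' then pvScanC cs (if cur ≠ [] then res ++ [pvIntOf cur] else res) []
    else pvScanC cs res (cur ++ [c])

theorem pvScanC_no_plus (ds : List Char) (h : ∀ c ∈ ds, c ≠ '+') :
    ∀ (cs : List Char) (res : List Int) (cur : List Char),
    pvScanC (ds ++ cs) res cur = pvScanC cs res (cur ++ ds) := by
  induction ds with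
  | nil => intro cs res cur; simp
  | cons d ds ih =>
    intro cs res cur
    have hd : d ≠ '+' := h d (by simp)
    simp only [List.cons_append, pvScanC, if_neg hd]
    rw [ih (fun c hc => h c (by simp [hc]))]
    simp

theorem pvA_loop_eq_scanC (vector : List String) :
    ∀ (res : List Int) (cur : List Char),
    (let st := pvA_loop vector res cur
     if st.2 ≠ [] then st.1 ++ [pvIntOf st.2] else st.1) =
    pvScanC ((vector.filter (fun e => PySem.Str.strIsdigit e || e == "+")).flatMap String.toList)
      res cur := by
  induction vector with
  | nil => intro res cur; simp [pvA_loop, pvScanC]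
  | cons e rest ih =>
    intro res cur
    by_cases hd : PySem.Str.strIsdigit e
    · have hnp : ∀ c ∈ e.toList, c ≠ '+' := by
        intro c hc
        have hd' := hd
        simp only [PySem.Str.strIsdigit, PySem.Chars.strIsdigit, Bool.and_eq_true,
          List.all_eq_true] at hd'
        have hcd := hd'.2 c hc
        simp only [PySem.Chars.isdigit, Bool.and_eq_true, decide_eq_true_eq] at hcd
        intro hEq; subst hEq; exact absurd hcd.1 (by decide)
      simp only [pvA_loop, hd, if_true, List.filter_cons, Bool.true_or,
        List.flatMap_cons]
      rw [pvScanC_no_plus e.toList hnp]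
      exact ih res (cur ++ e.toList)
    · have hd' : PySem.Str.strIsdigit e = false := by simpa using hd
      by_cases hp : e = "+"
      · subst hp
        simp only [pvA_loop, hd', Bool.false_eq_true, if_false, beq_self_eq_true, if_true,
          List.filter_cons, Bool.false_or, List.flatMap_cons]
        show _ = pvScanC ('+' :: _) res cur
        simp only [pvScanC, if_true]
        by_cases hc : cur ≠ []
        · rw [if_pos hc, if_pos hc]; exact ih _ []
        · rw [if_neg hc, if_neg hc]
          have : cur = [] := by simpa using hc
          subst this; exact ih res []
      · have hb : (e == "+") = false := by simpa using hp
        simp only [pvA_loop, hd', hb, Bool.false_eq_true, if_false, List.filter_cons,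
          Bool.false_or]
        exact ih res cur

theorem splitOnP_no_plus (cur : List Char) (h : '+' ∉ cur) :
    cur.splitOnP (· == '+') = [cur] := by
  induction cur with
  | nil => simp
  | cons c t ih =>
    have hc : (c == '+') = false := by
      simp only [beq_eq_false_iff_ne, ne_eq]; intro hEq; exact h (by simp [hEq])
    rw [List.splitOnP_cons, hc]
    simp only [Bool.false_eq_true, if_false]
    rw [ih (fun hm => h (by simp [hm]))]
    simp

theorem splitOnP_append_plus (cur cs : List Char) (h : '+' ∉ cur) :
    (cur ++ '+' :: cs).splitOnP (· == '+') = cur :: cs.splitOnP (· == '+') := by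
  induction cur with
  | nil => simp [List.splitOnP_cons]
  | cons c t ih =>
    have hc : (c == '+') = false := by
      simp only [beq_eq_false_iff_ne, ne_eq]; intro hEq; exact h (by simp [hEq])
    rw [List.cons_append, List.splitOnP_cons, hc]
    simp only [Bool.false_eq_true, if_false]
    rw [ih (fun hm => h (by simp [hm]))]
    simp

theorem pvScanC_eq_split (cs : List Char) :
    ∀ (res : List Int) (cur : List Char), '+' ∉ cur →
    pvScanC cs res cur =
      res ++ (((cur ++ cs).splitOnP (· == '+')).filter (fun s => !s.isEmpty)).map pvIntOf := by
  induction cs with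
  | nil =>
    intro res cur h
    rw [List.append_nil, splitOnP_no_plus cur h]
    by_cases hc : cur = []
    · subst hc; simp [pvScanC]
    · have he : cur.isEmpty = false := by simp [hc]
      simp [pvScanC, hc, List.filter, he]
  | cons c cs ih =>
    intro res cur h
    by_cases hp : c = '+'
    · subst hp
      simp only [pvScanC, if_true]
      rw [ih _ [] (by simp), splitOnP_append_plus cur cs h]
      by_cases hc : cur = []
      · subst hc; simp
      · simp only [ne_eq, hc, not_false_eq_true, if_pos, List.filter_cons, Bool.not_eq_true']
        simp [List.isEmpty_eq_false_iff, hc, List.append_assoc]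
    · simp only [pvScanC, if_neg hp]
      rw [ih res (cur ++ [c]) (by simp [h, Ne.symm hp])]
      simp [List.append_assoc]

-- ===== VERDICT (by name: the statement is the Claim_ definition above) =====
theorem procesar_vector_spec : Claim_equal_procesar_vector := by
  intro vector _
  show procesar_vector vector = procesar_vector_alt vector
  unfold procesar_vector procesar_vector_alt
  rw [pvA_loop_eq_scanC vector [] [], pvScanC_eq_split _ [] [] (by simp)]
  simp
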